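-- pv_equiv track=rewrite | github.com/ZUrlocker1/Zudio | tools/kosmic_analyze.py | activity_timeline
-- ===== SOURCE A (Python) =====
-- def activity_timeline(track_map, tpq, total_bars):
--     """
--     Compute which 8-bar windows contain at least one note per track.
--     Returns (grid dict, flags list).
--     grid: track_name → list of chars ('▓','▒','·') per window.
--     """
--     ticks_per_bar = tpq * 4
--     windows = list(range(0, total_bars, 8))  # 0-based bar starts
--     grid = {}
--
--     for tname in TRACK_ORDER:
--         if tname == 'Drums': continue
--         notes = track_map.get(tname, [])
--         row = []
--         for w in windows:
--             lo = w * ticks_per_bar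
--             hi = (w + 8) * ticks_per_bar
--             active = [n for n in notes if lo <= n[0] < hi]
--             if not active:
--                 row.append('·')
--             elif len(active) >= 3:
--                 row.append('▓')
--             else:
--                 row.append('▒')
--         if notes:
--             grid[tname] = row
--
--     flags = []
--     # NO-STAGGER: all pitched tracks with notes active from window 0 simultaneously
--     active_at_0 = [t for t, row in grid.items() if row and row[0] == '▓']
--     if len(active_at_0) >= 5:
--         flags.append(f'NO-STAGGER: {len(active_at_0)} tracks all active from bar 1')
--
--     # NO-GAPS: any lead/rhythm track active in every window
--     for tname, row in grid.items():
--         if tname in ('Bass', 'Pads', 'Lead Synth'): continue  # drones expected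
--         if row and all(c != '·' for c in row):
--             flags.append(f'NO-GAPS {tname}: never silent in any 8-bar window')
--
--     return grid, windows, flags
--
-- TRACK_ORDER = ['Lead 1', 'Lead 2', 'Pads', 'Rhythm', 'Texture', 'Bass', 'Drums', 'Lead Synth']
-- ===== SOURCE B (Python) =====
-- def activity_timeline(track_map, tpq, total_bars):
--     """
--     Same result as A, but each track's notes are bucketed once into their
--     8-bar window by integer division, instead of scanning all notes per window.
--     """
--     span = tpq * 4 * 8  # ticks per 8-bar window
--     windows = list(range(0, total_bars, 8))
--     grid = {}
--     for tname in ('Lead 1', 'Lead 2', 'Pads', 'Rhythm', 'Texture', 'Bass', 'Lead Synth'):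
--         notes = track_map.get(tname, [])
--         if not notes:
--             continue
--         counts = {}
--         if span > 0 and windows:
--             for n in notes:
--                 b = n[0] // span
--                 counts[b] = counts.get(b, 0) + 1
--         row = []
--         for w in windows:
--             c = counts.get(w // 8, 0)
--             row.append('▓' if c >= 3 else '▒' if c else '·')
--         grid[tname] = row
--
--     flags = []
--     strong_at_0 = sum(1 for r in grid.values() if r and r[0] == '▓')
--     if strong_at_0 >= 5:
--         flags.append(f'NO-STAGGER: {strong_at_0} tracks all active from bar 1')
--     for tname, row in grid.items():
--         if tname not in ('Bass', 'Pads', 'Lead Synth') and row and '·' not in row: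
--             flags.append(f'NO-GAPS {tname}: never silent in any 8-bar window')
--     return grid, windows, flags
-- ===== Notes on version B (the rewrite author's own statement) =====
-- stated objective: faster
-- what changed: Instead of rescanning the whole note list for every 8-bar window (tracks x windows x notes), B buckets each note once into its window index by integer division and counts per bucket, then emits each window's symbol by a dictionary lookup.
import Mathlib
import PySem

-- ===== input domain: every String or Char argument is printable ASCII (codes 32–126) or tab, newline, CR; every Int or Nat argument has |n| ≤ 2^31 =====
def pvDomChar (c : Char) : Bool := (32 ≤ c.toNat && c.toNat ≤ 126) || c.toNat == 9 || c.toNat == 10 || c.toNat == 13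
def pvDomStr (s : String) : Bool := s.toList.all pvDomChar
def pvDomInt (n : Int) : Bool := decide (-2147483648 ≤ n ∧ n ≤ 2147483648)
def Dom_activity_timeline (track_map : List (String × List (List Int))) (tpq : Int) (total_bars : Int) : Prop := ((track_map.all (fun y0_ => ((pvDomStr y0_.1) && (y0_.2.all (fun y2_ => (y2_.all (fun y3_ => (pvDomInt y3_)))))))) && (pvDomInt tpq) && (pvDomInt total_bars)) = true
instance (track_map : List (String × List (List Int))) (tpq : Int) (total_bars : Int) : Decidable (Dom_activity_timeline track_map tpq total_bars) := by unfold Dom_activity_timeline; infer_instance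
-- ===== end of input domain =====

-- B buckets each note once into its 8-bar window by integer division instead of
-- rescanning all notes for every window (objective: faster, asymptotic).
-- Equivalence is about the RETURN value; neither program mutates its arguments.

-- ===== PORT A =====
-- A-side helpers (transliteration of A's inner comprehension / row loop / flags part)
def pvTrackOrder : List String := ["Lead 1", "Lead 2", "Pads", "Rhythm", "Texture", "Bass", "Drums", "Lead Synth"]

-- n[0] ported as pyGetD n 0 0: exact for nonempty n; where Python raises IndexError (n = []),
-- the port reads the default 0 (port B does the same, so nothing is claimed beyond that).
def pvCharA (notes : List (List Int)) (tpb w : Int) : String :=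
  let lo := w * tpb
  let hi := (w + 8) * tpb
  let active := notes.filter (fun n =>
    decide (lo ≤ PySem.List.pyGetD n 0 0 ∧ PySem.List.pyGetD n 0 0 < hi))
  if active.length = 0 then "·" else if 3 ≤ active.length then "▓" else "▒"

def pvRowA (notes : List (List Int)) (windows : List Int) (tpb : Int) : List String :=
  windows.foldl (fun row w => row ++ [pvCharA notes tpb w]) []

def pvFlagsA (grid : PySem.Dict String (List String)) : List String :=
  let active_at_0 := (grid.items.filter (fun p =>
      decide (p.2 ≠ []) && decide (PySem.List.pyGetD p.2 0 "" = "▓"))).map (fun p => p.1)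
  let flags0 : List String :=
    if 5 ≤ active_at_0.length then
      ["NO-STAGGER: " ++ PySem.Int.toStr (active_at_0.length : Int) ++ " tracks all active from bar 1"]
    else []
  grid.items.foldl (fun fl p =>
    if p.1 = "Bass" ∨ p.1 = "Pads" ∨ p.1 = "Lead Synth" then fl
    else if p.2 ≠ [] ∧ p.2.all (fun c => decide (c ≠ "·")) = true then
      fl ++ ["NO-GAPS " ++ p.1 ++ ": never silent in any 8-bar window"]
    else fl) flags0

def activity_timeline (track_map : List (String × List (List Int))) (tpq : Int) (total_bars : Int) : (List (String × List String)) × List Int × List String :=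
  let ticks_per_bar := tpq * 4
  let windows := PySem.List.pyRange 0 total_bars 8
  let d := PySem.Dict.ofList track_map
  let grid : PySem.Dict String (List String) :=
    pvTrackOrder.foldl (fun grid tname =>
      if tname = "Drums" then grid
      else
        let notes := d.getD tname []
        let row := pvRowA notes windows ticks_per_bar
        if notes ≠ [] then grid.insert tname row else grid) PySem.Dict.empty
  (grid.items, windows, pvFlagsA grid)

-- ===== PORT B =====
-- B-side helpers (transliteration of Source B's bucket counter / row loop / flags part)
def pvBucketCounts (notes : List (List Int)) (span : Int) (windows : List Int) : PySem.Dict Int Int :=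
  if 0 < span ∧ windows ≠ [] then
    notes.foldl (fun d n =>
      let b := PySem.Int.floordiv (PySem.List.pyGetD n 0 0) span
      d.insert b (d.getD b 0 + 1)) PySem.Dict.empty
  else PySem.Dict.empty

def pvCharB (counts : PySem.Dict Int Int) (w : Int) : String :=
  let c := counts.getD (PySem.Int.floordiv w 8) 0
  if 3 ≤ c then "▓" else if c ≠ 0 then "▒" else "·"

def pvRowB (notes : List (List Int)) (windows : List Int) (span : Int) : List String :=
  let counts := pvBucketCounts notes span windows
  windows.foldl (fun row w => row ++ [pvCharB counts w]) []

def pvFlagsB (grid : PySem.Dict String (List String)) : List String :=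
  let strong := grid.values.foldl (fun acc r =>
      if r ≠ [] ∧ PySem.List.pyGetD r 0 "" = "▓" then acc + 1 else acc) (0 : Int)
  let flags0 : List String :=
    if 5 ≤ strong then
      ["NO-STAGGER: " ++ PySem.Int.toStr strong ++ " tracks all active from bar 1"]
    else []
  grid.items.foldl (fun fl p =>
    if p.1 ∉ (["Bass", "Pads", "Lead Synth"] : List String) ∧ p.2 ≠ [] ∧ "·" ∉ p.2 then
      fl ++ ["NO-GAPS " ++ p.1 ++ ": never silent in any 8-bar window"]
    else fl) flags0

def activity_timeline_alt (track_map : List (String × List (List Int))) (tpq : Int) (total_bars : Int) : (List (String × List String)) × List Int × List String :=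
  let span := tpq * 4 * 8
  let windows := PySem.List.pyRange 0 total_bars 8
  let d := PySem.Dict.ofList track_map
  let grid : PySem.Dict String (List String) :=
    (["Lead 1", "Lead 2", "Pads", "Rhythm", "Texture", "Bass", "Lead Synth"] : List String).foldl
      (fun grid tname =>
        let notes := d.getD tname []
        if notes = [] then grid
        else grid.insert tname (pvRowB notes windows span)) PySem.Dict.empty
  (grid.items, windows, pvFlagsB grid)

-- ===== PRECONDITION & SPEC =====
-- Pre_ is exactly where Python A returns: A raises IndexError (n[0] on an empty note event
-- []) iff total_bars > 0 and some pitched TRACK_ORDER track's note list contains [].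
def Pre_activity_timeline (track_map : List (String × List (List Int))) (tpq : Int) (total_bars : Int) : Prop :=
  0 < total_bars →
    ∀ t ∈ (["Lead 1", "Lead 2", "Pads", "Rhythm", "Texture", "Bass", "Lead Synth"] : List String),
      [] ∉ (PySem.Dict.ofList track_map).getD t []
instance (track_map : List (String × List (List Int))) (tpq : Int) (total_bars : Int) : Decidable (Pre_activity_timeline track_map tpq total_bars) := by unfold Pre_activity_timeline; infer_instance

def pvWitness_activity_timeline : (List (String × List (List Int))) × Int × Int :=
  ([("Lead 1", [[0], [5], [9]]), ("Bass", [[3]])], 2, 16)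

def Spec_activity_timeline (track_map : List (String × List (List Int))) (tpq : Int) (total_bars : Int) (out : (List (String × List String)) × List Int × List String) : Prop := out = activity_timeline_alt track_map tpq total_bars
instance (track_map : List (String × List (List Int))) (tpq : Int) (total_bars : Int) (out : (List (String × List String)) × List Int × List String) : Decidable (Spec_activity_timeline track_map tpq total_bars out) := by unfold Spec_activity_timeline; infer_instance

-- ===== CLAIM (what is proved, stated in full; the proofs are below) =====
def Claim_equal_activity_timeline : Prop := ∀ (track_map : List (String × List (List Int))) (tpq : Int) (total_bars : Int), Dom_activity_timeline track_map tpq total_bars → Pre_activity_timeline track_map tpq total_bars → Spec_activity_timeline track_map tpq total_bars (activity_timeline track_map tpq total_bars)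

-- ===== LEMMAS AND PROOFS =====

theorem pvChar_eq (notes : List (List Int)) (tpq k : Int) (windows : List Int) (hw : windows ≠ []) :
    pvCharA notes (tpq * 4) (8 * k) = pvCharB (pvBucketCounts notes (tpq * 4 * 8) windows) (8 * k) := by
  unfold pvCharA pvCharB pvBucketCounts
  dsimp only
  have h8 : PySem.Int.floordiv (8 * k) 8 = k := by
    rw [PySem.Int.floordiv_eq_iff_of_pos (by norm_num)]; omega
  rw [h8]
  by_cases hs : 0 < tpq * 4 * 8
  · have hc : 0 < tpq * 4 * 8 ∧ windows ≠ [] := ⟨hs, hw⟩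
    rw [if_pos hc]
    have hfold :
        (notes.foldl (fun d n =>
          let b := PySem.Int.floordiv (PySem.List.pyGetD n 0 0) (tpq * 4 * 8)
          d.insert b (d.getD b 0 + 1)) PySem.Dict.empty).getD k 0
        = ((notes.map (fun n => PySem.Int.floordiv (PySem.List.pyGetD n 0 0) (tpq * 4 * 8))).count k : Int) := by
      show (notes.foldl (fun (d : PySem.Dict Int Int) n =>
          d.insert (PySem.Int.floordiv (PySem.List.pyGetD n 0 0) (tpq * 4 * 8))
            (d.getD (PySem.Int.floordiv (PySem.List.pyGetD n 0 0) (tpq * 4 * 8)) 0 + 1))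
          PySem.Dict.empty).getD k 0
        = ((notes.map (fun n => PySem.Int.floordiv (PySem.List.pyGetD n 0 0) (tpq * 4 * 8))).count k : Int)
      rw [← List.foldl_map
        (f := fun n => PySem.Int.floordiv (PySem.List.pyGetD n 0 0) (tpq * 4 * 8))
        (g := fun (d : PySem.Dict Int Int) b => d.insert b (d.getD b 0 + 1))]
      rw [PySem.Dict.getD_foldl_insert_add_one]
      simp
    rw [hfold]
    have hcnt :
        (notes.map (fun n => PySem.Int.floordiv (PySem.List.pyGetD n 0 0) (tpq * 4 * 8))).count k
        = (notes.filter (fun n =>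
            decide (8 * k * (tpq * 4) ≤ PySem.List.pyGetD n 0 0 ∧
              PySem.List.pyGetD n 0 0 < (8 * k + 8) * (tpq * 4)))).length := by
      rw [← List.countP_eq_length_filter, List.count_eq_countP, List.countP_map]
      apply List.countP_congr
      intro n _
      simp only [Function.comp, beq_iff_eq, decide_eq_true_eq]
      rw [PySem.Int.floordiv_eq_iff_of_pos hs]
      constructor <;> rintro ⟨h1, h2⟩ <;> constructor <;> nlinarith
    rw [← hcnt]
    split_ifs <;> first | rfl | omega
  · have hc : ¬(0 < tpq * 4 * 8 ∧ windows ≠ []) := fun h => hs h.1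
    rw [if_neg hc]
    have hemp : (notes.filter (fun n =>
        decide (8 * k * (tpq * 4) ≤ PySem.List.pyGetD n 0 0 ∧
          PySem.List.pyGetD n 0 0 < (8 * k + 8) * (tpq * 4)))).length = 0 := by
      rw [List.length_eq_zero_iff, List.filter_eq_nil_iff]
      intro n _
      simp only [decide_eq_true_eq, not_and, not_lt]
      intro h1
      nlinarith
    rw [hemp]
    simp [PySem.Dict.getD_empty]

theorem pvRow_eq (notes : List (List Int)) (tpq total_bars : Int) :
    pvRowA notes (PySem.List.pyRange 0 total_bars 8) (tpq * 4)
    = pvRowB notes (PySem.List.pyRange 0 total_bars 8) (tpq * 4 * 8) := by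
  by_cases hwin : PySem.List.pyRange 0 total_bars 8 = []
  · unfold pvRowA pvRowB
    rw [hwin]
    rfl
  · unfold pvRowA pvRowB
    rw [PySem.List.foldl_append_singleton_eq_map, PySem.List.foldl_append_singleton_eq_map]
    simp only [List.nil_append]
    apply List.map_congr_left
    intro w hw
    obtain ⟨hw0, _, hdvd⟩ := (PySem.List.mem_pyRange_iff_of_pos (by norm_num) w).1 hw
    obtain ⟨k, hk⟩ : (8 : Int) ∣ w := by simpa using hdvd
    subst hk
    exact pvChar_eq notes tpq k _ hwin

theorem pvFlags_eq (g : PySem.Dict String (List String)) : pvFlagsA g = pvFlagsB g := by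
  unfold pvFlagsA pvFlagsB
  dsimp only
  have hstrong :
      (g.values.foldl (fun acc r =>
        if r ≠ [] ∧ PySem.List.pyGetD r 0 "" = "▓" then acc + 1 else acc) (0 : Int))
      = (((g.items.filter (fun p =>
          decide (p.2 ≠ []) && decide (PySem.List.pyGetD p.2 0 "" = "▓"))).map (fun p => p.1)).length : Int) := by
    rw [PySem.List.foldl_ite_add_one]
    rw [List.length_map, ← List.countP_eq_length_filter]
    simp only [PySem.Dict.values, List.countP_map, zero_add]
    congr 1
    apply List.countP_congr
    intro p _
    simp [Function.comp]
  rw [hstrong]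
  have hflags0 :
      (if (5 : Int) ≤ (((g.items.filter (fun p =>
          decide (p.2 ≠ []) && decide (PySem.List.pyGetD p.2 0 "" = "▓"))).map (fun p => p.1)).length : Int) then
        ["NO-STAGGER: " ++ PySem.Int.toStr ((((g.items.filter (fun p =>
          decide (p.2 ≠ []) && decide (PySem.List.pyGetD p.2 0 "" = "▓"))).map (fun p => p.1)).length : Int)) ++ " tracks all active from bar 1"]
      else [])
      = (if 5 ≤ (((g.items.filter (fun p =>
          decide (p.2 ≠ []) && decide (PySem.List.pyGetD p.2 0 "" = "▓"))).map (fun p => p.1)).length) then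
        ["NO-STAGGER: " ++ PySem.Int.toStr ((((g.items.filter (fun p =>
          decide (p.2 ≠ []) && decide (PySem.List.pyGetD p.2 0 "" = "▓"))).map (fun p => p.1)).length : Int)) ++ " tracks all active from bar 1"]
      else []) := by
    split_ifs <;> first | rfl | omega
  rw [hflags0]
  apply PySem.List.foldl_congr_mem
  intro fl p _
  have hall : (p.2.all (fun c => decide (c ≠ "·")) = true) ↔ "·" ∉ p.2 := by
    simp only [List.all_eq_true, decide_eq_true_eq]
    constructor
    · intro h hm; exact h _ hm rfl
    · intro h c hc he; exact h (he ▸ hc)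
  have hmem : (p.1 ∈ (["Bass", "Pads", "Lead Synth"] : List String)) ↔
      (p.1 = "Bass" ∨ p.1 = "Pads" ∨ p.1 = "Lead Synth") := by simp
  by_cases h1 : p.1 = "Bass" ∨ p.1 = "Pads" ∨ p.1 = "Lead Synth"
  · rw [if_pos h1, if_neg]
    intro ⟨hn, _, _⟩; exact hn (hmem.2 h1)
  · rw [if_neg h1]
    by_cases h2 : p.2 ≠ [] ∧ p.2.all (fun c => decide (c ≠ "·")) = true
    · rw [if_pos h2, if_pos ⟨fun hm => h1 (hmem.1 hm), h2.1, hall.1 h2.2⟩]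
    · rw [if_neg h2, if_neg]
      intro ⟨_, hne, hni⟩; exact h2 ⟨hne, hall.2 hni⟩

theorem pvEq_all (track_map : List (String × List (List Int))) (tpq total_bars : Int) :
    activity_timeline track_map tpq total_bars = activity_timeline_alt track_map tpq total_bars := by
  unfold activity_timeline activity_timeline_alt
  simp only [pvTrackOrder, List.foldl_cons, List.foldl_nil, pvRow_eq, pvFlags_eq,
    String.reduceEq, reduceIte, ne_eq, ite_not]

-- ===== VERDICT (by name: the statement is the Claim_ definition above) =====
theorem activity_timeline_spec : Claim_equal_activity_timeline := by
  intro track_map tpq total_bars _ _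
  unfold Spec_activity_timeline
  exact pvEq_all track_map tpq total_bars
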